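-- pv_equiv track=rewrite | github.com/FrozenBerrys/Buggy_tetris | tetris.py | checkleftbound
-- ===== SOURCE A (Python) =====
-- def checkleftbound(rect):
--     x = 500
--     for i in rect:
--         if i[0] < x:
--             x = i[0]
--     if x < 150:
--         return True
--     return False
-- ===== SOURCE B (Python) =====
-- def checkleftbound(rect):
--     return any(point[0] < 150 for point in rect)
-- ===== Notes on version B (the rewrite author's own statement) =====
-- stated objective: simpler
-- what changed: Replaces the running-minimum accumulator (sentinel 500) and final threshold comparison with a direct short-circuiting existential test for any x-coordinate below 150.
import Mathlib
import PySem

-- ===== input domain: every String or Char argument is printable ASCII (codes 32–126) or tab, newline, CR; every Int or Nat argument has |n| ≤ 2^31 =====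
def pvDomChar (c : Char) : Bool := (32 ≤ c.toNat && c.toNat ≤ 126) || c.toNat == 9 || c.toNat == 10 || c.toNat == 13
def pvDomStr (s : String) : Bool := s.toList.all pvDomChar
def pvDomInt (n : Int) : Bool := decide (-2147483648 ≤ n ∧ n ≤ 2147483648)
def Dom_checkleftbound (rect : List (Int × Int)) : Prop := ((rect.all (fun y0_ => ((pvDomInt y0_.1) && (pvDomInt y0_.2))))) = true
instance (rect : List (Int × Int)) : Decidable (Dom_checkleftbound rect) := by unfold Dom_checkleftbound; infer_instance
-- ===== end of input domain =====

-- B replaces A's running-minimum-then-compare with a direct short-circuiting existential test (simpler).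

-- ===== PORT A =====
-- A: keep a running minimum x starting at 500, then compare with 150.
def checkleftbound (rect : List (Int × Int)) : Bool :=
  let x := rect.foldl (fun x i => if i.1 < x then i.1 else x) 500
  if x < 150 then true else false

-- ===== PORT B =====
-- B: any(point[0] < 150 for point in rect)
def checkleftbound_alt (rect : List (Int × Int)) : Bool :=
  rect.any (fun point => point.1 < 150)

-- ===== PRECONDITION & SPEC =====
def Spec_checkleftbound (rect : List (Int × Int)) (out : Bool) : Prop := out = checkleftbound_alt rect
instance (rect : List (Int × Int)) (out : Bool) : Decidable (Spec_checkleftbound rect out) := by unfold Spec_checkleftbound; infer_instance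

-- ===== CLAIM (what is proved, stated in full; the proofs are below) =====
def Claim_equal_checkleftbound : Prop := ∀ (rect : List (Int × Int)), Dom_checkleftbound rect → Spec_checkleftbound rect (checkleftbound rect)

-- ===== LEMMAS AND PROOFS =====

-- loop invariant: the running minimum ends below 150 iff the seed is below 150 or some element is
theorem pv_min_lt_iff (rect : List (Int × Int)) : ∀ (x : Int),
    (decide (rect.foldl (fun x i => if i.1 < x then i.1 else x) x < 150))
      = (decide (x < 150) || rect.any (fun p => p.1 < 150)) := by
  induction rect with
  | nil => intro x; simp
  | cons h t ih =>
    intro x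
    simp only [List.foldl_cons, List.any_cons]
    by_cases hlt : h.1 < x
    · simp only [if_pos hlt, ih]
      by_cases h1 : h.1 < 150 <;> by_cases h2 : x < 150 <;> simp [h1, h2] <;> omega
    · simp only [if_neg hlt, ih]
      by_cases h1 : h.1 < 150 <;> by_cases h2 : x < 150 <;> simp [h1, h2] <;> omega

-- ===== VERDICT (by name: the statement is the Claim_ definition above) =====
theorem checkleftbound_spec : Claim_equal_checkleftbound := by
  intro rect _
  unfold Spec_checkleftbound checkleftbound checkleftbound_alt
  have h := pv_min_lt_iff rect 500
  simp only [show decide ((500:Int) < 150) = false by decide, Bool.false_or] at h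
  dsimp only
  split_ifs with hx
  · rw [← h, decide_eq_true hx]
  · rw [← h, decide_eq_false hx]
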